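-- pv_equiv track=rewrite | github.com/PerryXDeng/weaponizing_unicode | feature_cluster_algos.py | generate_minimum_used_fonts_dict
-- ===== SOURCE A (Python) =====
-- def generate_minimum_used_fonts_dict(unicode_supported_fonts_drawn_dict) -> dict:
--   num_unicodes = len(unicode_supported_fonts_drawn_dict)
--   minimum_font_dict = {}
--   for unicode, font_feature_dict in unicode_supported_fonts_drawn_dict.items():
--     supported_fonts = font_feature_dict.keys()
--     for font in supported_fonts:
--       if font not in minimum_font_dict:
--         minimum_font_dict[font] = [unicode]
--       else:
--         minimum_font_dict[font].append(unicode)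
--   font_unicodes_list = list(minimum_font_dict.items())
--   minimum_used_fonts_dict = {}
--   last_update = []
--   copied_font_unicodes_list = font_unicodes_list.copy()
--   while len(minimum_used_fonts_dict) < num_unicodes:
--     max_len_index = -1
--     max_len = 0
--     for char_ in range(len(copied_font_unicodes_list)):
--       copied_font_unicodes_list[char_] = (copied_font_unicodes_list[char_][0],
--                                           [i for i in copied_font_unicodes_list[char_][1] if
--                                            i not in last_update])
--       font_len = len(copied_font_unicodes_list[char_][1])
--       if font_len > max_len:
--         max_len = font_len
--         max_len_index = char_
--     most_supported_font = copied_font_unicodes_list[max_len_index]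
--     for unicode in most_supported_font[1]:
--       assert unicode not in minimum_used_fonts_dict
--       minimum_used_fonts_dict[unicode] = most_supported_font[0]
--     last_update = most_supported_font[1]
--     del copied_font_unicodes_list[max_len_index]
--   return minimum_used_fonts_dict
-- ===== SOURCE B (Python) =====
-- def _insort(pq, entry):
--   i = 0
--   while i < len(pq) and pq[i] < entry:
--     i += 1
--   pq.insert(i, entry)
--
-- def generate_minimum_used_fonts_dict(unicode_supported_fonts_drawn_dict) -> dict:
--   # Lazy priority queue: entries (-stored_count, insertion_index) kept sorted so the
--   # best candidate is always at the front; counts go stale as unicodes get assigned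
--   # and are revalidated only when an entry reaches the front (stale entries are
--   # re-inserted with their fresh count instead of rescanning every font each round).
--   font_unicodes = {}
--   for unicode, font_feature_dict in unicode_supported_fonts_drawn_dict.items():
--     for font in font_feature_dict.keys():
--       font_unicodes.setdefault(font, []).append(unicode)
--   fonts = list(font_unicodes.keys())
--   pq = []
--   for index, font in enumerate(fonts):
--     _insort(pq, (-len(font_unicodes[font]), index))
--   assigned = set()
--   result = {}
--   num_unicodes = len(unicode_supported_fonts_drawn_dict)
--   while len(result) < num_unicodes:
--     while True:
--       neg_stored, index = pq.pop(0)
--       font = fonts[index]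
--       live = [u for u in font_unicodes[font] if u not in assigned]
--       if len(live) == -neg_stored:
--         break
--       _insort(pq, (-len(live), index))
--     for u in live:
--       result[u] = font
--       assigned.add(u)
--   return result
-- ===== Notes on version B (the rewrite author's own statement) =====
-- stated objective: alternative
-- what changed: A rescans and rewrites every font's unicode list each round to find the next font; B maintains a lazy priority queue of (-count, insertion_index) entries kept sorted, pops the front, revalidates only that entry's count against the assigned set and re-inserts it if stale, so a round touches only the popped entries instead of every font.
import Mathlib
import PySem

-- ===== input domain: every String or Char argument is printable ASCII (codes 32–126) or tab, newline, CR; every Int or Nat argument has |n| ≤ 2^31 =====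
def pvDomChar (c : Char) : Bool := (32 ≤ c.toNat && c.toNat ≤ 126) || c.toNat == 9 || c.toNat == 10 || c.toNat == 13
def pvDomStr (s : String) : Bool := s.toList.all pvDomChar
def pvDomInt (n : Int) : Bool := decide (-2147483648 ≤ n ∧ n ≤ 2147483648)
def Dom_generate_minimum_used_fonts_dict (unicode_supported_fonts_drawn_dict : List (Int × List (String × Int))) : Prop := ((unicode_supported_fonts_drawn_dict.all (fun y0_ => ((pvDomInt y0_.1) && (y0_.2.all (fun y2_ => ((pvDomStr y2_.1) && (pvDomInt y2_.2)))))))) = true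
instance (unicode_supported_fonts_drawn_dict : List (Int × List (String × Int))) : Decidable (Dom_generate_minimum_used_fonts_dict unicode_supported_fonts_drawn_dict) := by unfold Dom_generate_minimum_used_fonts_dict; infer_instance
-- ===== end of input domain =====

-- B replaces A's per-round rescan-and-rewrite of every font's unicode list by a lazy
-- priority queue of (-count, insertion_index) entries kept sorted: only the popped
-- entry's count is revalidated against the assigned set (objective: alternative).

-- ===== PORT A =====
-- inner 'for font in supported_fonts: if font not in minimum_font_dict: … else append'
def pvA_buildStep (d : PySem.Dict String (List Int)) (p : Int × List (String × Int)) : PySem.Dict String (List Int) :=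
  (p.2.map Prod.fst).foldl
    (fun d font =>
      if !(d.contains font) then d.insert font [p.1]
      else d.modify font [] (fun us => us ++ [p.1])) d

def pvA_buildIndex (l : List (Int × List (String × Int))) : PySem.Dict String (List Int) :=
  l.foldl pvA_buildStep PySem.Dict.empty

-- 'for char_ in range(len(copied_font_unicodes_list)): …' — rebuilds the filtered list and
-- tracks (max_len, max_len_index) with the strict 'font_len > max_len' update
def pvA_scan (last : List Int) : List (String × List Int) → Nat → Nat → Int → List (String × List Int) × Nat × Int
  | [], _, ml, mi => ([], ml, mi)
  | p :: rest, i, ml, mi =>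
    let us' := p.2.filter (fun u => !last.contains u)
    let r := if ml < us'.length then pvA_scan last rest (i+1) us'.length (i : Int)
             else pvA_scan last rest (i+1) ml mi
    ((p.1, us') :: r.1, r.2)

-- the while-loop; fuel strictly exceeds the number of fonts, one font is deleted per round.
-- 'copied[max_len_index]' followed by 'del copied[max_len_index]' (same, possibly negative,
-- index) is PySem.List.pop?; 'none' is exactly Python's IndexError (excluded by Pre_).
def pvA_loop : Nat → List (String × List Int) → List Int → PySem.Dict Int String → Nat → PySem.Dict Int String
  | 0, _, _, res, _ => res
  | fuel+1, lst, last, res, num =>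
    if res.size < num then
      let s := pvA_scan last lst 0 0 (-1)
      match PySem.List.pop? s.1 s.2.2 with
      | none => res        -- Python raises IndexError here (outside Pre_)
      | some (p, lst') =>
        let res' := p.2.foldl (fun d u => d.insert u p.1) res
        pvA_loop fuel lst' p.2 res' num
    else res

def generate_minimum_used_fonts_dict (unicode_supported_fonts_drawn_dict : List (Int × List (String × Int))) : List (Int × String) :=
  let mfd := pvA_buildIndex unicode_supported_fonts_drawn_dict
  let ful := mfd.items
  (pvA_loop (ful.length + 1) ful [] PySem.Dict.empty unicode_supported_fonts_drawn_dict.length).items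

-- ===== PORT B =====
-- 'font_unicodes.setdefault(font, []).append(unicode)'
def pvB_buildIndex (l : List (Int × List (String × Int))) : PySem.Dict String (List Int) :=
  l.foldl
    (fun d p => (p.2.map Prod.fst).foldl (fun d font => d.modify font [] (fun us => us ++ [p.1])) d)
    PySem.Dict.empty

-- Python tuple comparison on the (neg_count, index) entries
def pvEntryLt (a b : Int × Int) : Bool := a.1 < b.1 || (a.1 == b.1 && a.2 < b.2)

-- '_insort(pq, entry)': walk past smaller entries, insert before the first not-smaller one
def pvInsort (e : Int × Int) : List (Int × Int) → List (Int × Int)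
  | [] => [e]
  | x :: xs => if pvEntryLt x e then x :: pvInsort e xs else e :: x :: xs

-- 'live = [u for u in font_unicodes[fonts[index]] if u not in assigned]'
-- (index is a nonnegative enumerate index, so pyGetD with it is exact here)
def pvLive (D : PySem.Dict String (List Int)) (K : List String) (ass : PySem.Set Int) (i : Int) : List Int :=
  (D.getD (PySem.List.pyGetD K i "") []).filter (fun u => !(PySem.Set.contains ass u))

-- fuel bound for the inner 'while True' (strictly more than the possible stale pops)
def pvPopFuel (pq : List (Int × Int)) : Nat := (pq.map (fun e => (-e.1).toNat)).sum + pq.length + 2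

-- the inner 'while True': pop pq[0]; break if the stored count is fresh, else re-insort
-- with the fresh count; 'none' covers pq.pop(0) on an empty queue = IndexError (outside Pre_)
def pvPopLoop (D : PySem.Dict String (List Int)) (K : List String) (ass : PySem.Set Int) : Nat → List (Int × Int) → Option ((Int × Int) × List Int × List (Int × Int))
  | 0, _ => none
  | _+1, [] => none
  | fuel+1, e :: rest =>
    let live := pvLive D K ass e.2
    if (live.length : Int) = -e.1 then some (e, live, rest)
    else pvPopLoop D K ass fuel (pvInsort (-(live.length : Int), e.2) rest)

-- the outer 'while len(result) < num_unicodes'; one entry leaves the queue per round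
def pvB_loop (D : PySem.Dict String (List Int)) (K : List String) : Nat → List (Int × Int) → PySem.Set Int → PySem.Dict Int String → Nat → PySem.Dict Int String
  | 0, _, _, res, _ => res
  | fuel+1, pq, ass, res, num =>
    if res.size < num then
      match pvPopLoop D K ass (pvPopFuel pq) pq with
      | none => res        -- Python raises IndexError here (outside Pre_)
      | some (e, live, rest) =>
        let font := PySem.List.pyGetD K e.2 ""
        pvB_loop D K fuel rest (PySem.Set.update ass live) (live.foldl (fun d u => d.insert u font) res) num
    else res

def generate_minimum_used_fonts_dict_alt (unicode_supported_fonts_drawn_dict : List (Int × List (String × Int))) : List (Int × String) :=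
  let D := pvB_buildIndex unicode_supported_fonts_drawn_dict
  let K := D.keys
  let pq := (PySem.List.enumerate K 0).foldl
    (fun pq p => pvInsort (-((D.getD p.2 []).length : Int), p.1) pq) []
  (pvB_loop D K (K.length + 1) pq PySem.Set.empty PySem.Dict.empty unicode_supported_fonts_drawn_dict.length).items

-- ===== PRECONDITION & SPEC =====
-- The Nodup clauses only pin the association-list ENCODING of the Python dict argument
-- (a list with duplicate keys does not represent any dict, so they exclude no Python
-- input A accepts); 'p.2 ≠ []' excludes exactly the inputs on which A raises IndexError
-- (a unicode supported by no font leaves the greedy loop unable to cover it).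
def Pre_generate_minimum_used_fonts_dict (unicode_supported_fonts_drawn_dict : List (Int × List (String × Int))) : Prop :=
  (unicode_supported_fonts_drawn_dict.map Prod.fst).Nodup ∧
  ∀ p ∈ unicode_supported_fonts_drawn_dict, (p.2.map Prod.fst).Nodup ∧ p.2 ≠ []

instance (unicode_supported_fonts_drawn_dict : List (Int × List (String × Int))) : Decidable (Pre_generate_minimum_used_fonts_dict unicode_supported_fonts_drawn_dict) := by
  unfold Pre_generate_minimum_used_fonts_dict; infer_instance

def pvWitness_generate_minimum_used_fonts_dict : (List (Int × List (String × Int))) :=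
  [(65, [("arial", 1)]), (66, [("arial", 0), ("times", 1)])]

def Spec_generate_minimum_used_fonts_dict (unicode_supported_fonts_drawn_dict : List (Int × List (String × Int))) (out : List (Int × String)) : Prop := out = generate_minimum_used_fonts_dict_alt unicode_supported_fonts_drawn_dict
instance (unicode_supported_fonts_drawn_dict : List (Int × List (String × Int))) (out : List (Int × String)) : Decidable (Spec_generate_minimum_used_fonts_dict unicode_supported_fonts_drawn_dict out) := by unfold Spec_generate_minimum_used_fonts_dict; infer_instance

-- ===== CLAIM (what is proved, stated in full; the proofs are below) =====
def Claim_equal_generate_minimum_used_fonts_dict : Prop := ∀ (unicode_supported_fonts_drawn_dict : List (Int × List (String × Int))), Dom_generate_minimum_used_fonts_dict unicode_supported_fonts_drawn_dict → Pre_generate_minimum_used_fonts_dict unicode_supported_fonts_drawn_dict → Spec_generate_minimum_used_fonts_dict unicode_supported_fonts_drawn_dict (generate_minimum_used_fonts_dict unicode_supported_fonts_drawn_dict)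

-- ===== LEMMAS AND PROOFS =====

-- A's build step writes the same dict as B's: inserting a fresh key with [u] IS modifying with default []
theorem pvBuild_step_eq (d : PySem.Dict String (List Int)) (font : String) (u : Int) :
    (if !(d.contains font) then d.insert font [u] else d.modify font [] (fun us => us ++ [u]))
      = d.modify font [] (fun us => us ++ [u]) := by
  by_cases h : d.contains font
  · simp [h]
  · simp only [Bool.not_eq_true] at h
    simp [h, PySem.Dict.modify, PySem.Dict.getD_of_not_contains d ([] : List Int) h]

theorem pvBuild_eq (l : List (Int × List (String × Int))) : pvA_buildIndex l = pvB_buildIndex l := by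
  unfold pvA_buildIndex pvB_buildIndex pvA_buildStep
  have hstep : (fun (d : PySem.Dict String (List Int)) (p : Int × List (String × Int)) =>
      (p.2.map Prod.fst).foldl
        (fun d font => if !(d.contains font) then d.insert font [p.1]
                       else d.modify font [] (fun us => us ++ [p.1])) d)
      = (fun d p => (p.2.map Prod.fst).foldl (fun d font => d.modify font [] (fun us => us ++ [p.1])) d) := by
    funext d p
    congr 1
    funext d font
    exact pvBuild_step_eq d font p.1
  rw [hstep]

theorem pvBuild_keys_nodup_aux :
    ∀ (l : List (Int × List (String × Int))) (d : PySem.Dict String (List Int)),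
      d.keys.Nodup →
      ((l.foldl (fun d p => (p.2.map Prod.fst).foldl (fun d font => d.modify font [] (fun us => us ++ [p.1])) d) d)).keys.Nodup := by
  intro l
  induction l with
  | nil => intro d h; simpa using h
  | cons p rest ih =>
    intro d h
    simp only [List.foldl_cons]
    apply ih
    rw [PySem.Dict.keys_foldl_modify]
    exact PySem.Set.nodup_update _ _ h

theorem pvBuild_keys_nodup (l : List (Int × List (String × Int))) : (pvB_buildIndex l).keys.Nodup := by
  unfold pvB_buildIndex
  exact pvBuild_keys_nodup_aux l PySem.Dict.empty PySem.Dict.nodup_keys_empty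

-- the invariant relation between an A-side entry and the font it stands for
def pvRel (D : PySem.Dict String (List Int)) (last : List Int) (ass : PySem.Set Int)
    (p : String × List Int) (f : String) : Prop :=
  p.1 = f ∧ p.2.filter (fun u => !last.contains u)
              = (D.getD f []).filter (fun u => !(PySem.Set.contains ass u))

-- Bool form of membership in Set.update
theorem pvContains_update (ass : PySem.Set Int) (L : List Int) (x : Int) :
    PySem.Set.contains (PySem.Set.update ass L) x = (PySem.Set.contains ass x || L.contains x) := by
  rw [Bool.eq_iff_iff, Bool.or_eq_true, PySem.Set.contains_iff, PySem.Set.contains_iff,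
    PySem.Set.mem_update]
  simp

theorem pvLive_update (D : PySem.Dict String (List Int)) (K : List String) (ass : PySem.Set Int)
    (L : List Int) (i : Int) :
    pvLive D K (PySem.Set.update ass L) i = (pvLive D K ass i).filter (fun u => !L.contains u) := by
  unfold pvLive
  rw [List.filter_filter]
  apply List.filter_congr
  intro x _
  rw [pvContains_update]
  simp [Bool.and_comm]

-- ---- the entry order: transitive, and total on entries with distinct indices ----
theorem pvEntryLt_trans {a b c : Int × Int} (h1 : pvEntryLt a b = true) (h2 : pvEntryLt b c = true) :
    pvEntryLt a c = true := by
  unfold pvEntryLt at *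
  simp only [Bool.or_eq_true, Bool.and_eq_true, decide_eq_true_eq, beq_iff_eq] at *
  omega

theorem pvEntryLt_total {a b : Int × Int} (h : a.2 ≠ b.2) :
    pvEntryLt a b = true ∨ pvEntryLt b a = true := by
  unfold pvEntryLt
  simp only [Bool.or_eq_true, Bool.and_eq_true, decide_eq_true_eq, beq_iff_eq]
  omega

theorem pvInsort_perm (e : Int × Int) : ∀ (l : List (Int × Int)), (pvInsort e l).Perm (e :: l) := by
  intro l
  induction l with
  | nil => simp [pvInsort]
  | cons x xs ih =>
    unfold pvInsort
    split_ifs with h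
    · exact ((ih.cons x).trans (List.Perm.swap e x xs))
    · exact List.Perm.refl _

theorem pvInsort_sorted (e : Int × Int) :
    ∀ (l : List (Int × Int)), l.Pairwise (fun a b => pvEntryLt a b = true) →
      (∀ x ∈ l, x.2 ≠ e.2) →
      (pvInsort e l).Pairwise (fun a b => pvEntryLt a b = true) := by
  intro l
  induction l with
  | nil => intro _ _; simp [pvInsort]
  | cons x xs ih =>
    intro hs hne
    obtain ⟨hx, hxs⟩ := List.pairwise_cons.mp hs
    unfold pvInsort
    split_ifs with h
    · rw [List.pairwise_cons]
      refine ⟨?_, ih hxs (fun y hy => hne y (List.mem_cons_of_mem _ hy))⟩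
      intro y hy
      rcases List.mem_cons.mp ((pvInsort_perm e xs).mem_iff.mp hy) with rfl | hy
      · exact h
      · exact hx y hy
    · have hlt : pvEntryLt e x = true := by
        have hne2 : e.2 ≠ x.2 := fun hh => hne x List.mem_cons_self hh.symm
        rcases pvEntryLt_total hne2 with h' | h'
        · exact h'
        · exact absurd h' h
      rw [List.pairwise_cons]
      refine ⟨?_, hs⟩
      intro y hy
      rcases List.mem_cons.mp hy with rfl | hy
      · exact hlt
      · exact pvEntryLt_trans hlt (hx y hy)

theorem pvFoldl_insort_perm :
    ∀ (l : List (Int × Int)) (pq : List (Int × Int)),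
      (l.foldl (fun pq e => pvInsort e pq) pq).Perm (pq ++ l) := by
  intro l
  induction l with
  | nil => intro pq; simp
  | cons x xs ih =>
    intro pq
    simp only [List.foldl_cons]
    refine (ih (pvInsort x pq)).trans ?_
    have h1 : (pvInsort x pq ++ xs).Perm ((x :: pq) ++ xs) := (pvInsort_perm x pq).append_right xs
    refine h1.trans ?_
    simp only [List.cons_append]
    exact (List.perm_middle).symm

theorem pvFoldl_insort_sorted :
    ∀ (l : List (Int × Int)) (pq : List (Int × Int)),
      pq.Pairwise (fun a b => pvEntryLt a b = true) →
      ((pq ++ l).map Prod.snd).Nodup →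
      (l.foldl (fun pq e => pvInsort e pq) pq).Pairwise (fun a b => pvEntryLt a b = true) := by
  intro l
  induction l with
  | nil => intro pq h _; simpa using h
  | cons x xs ih =>
    intro pq hs hnd
    have hmid : (pq ++ x :: xs).Perm (x :: (pq ++ xs)) := List.perm_middle
    have hnd' : ((x :: (pq ++ xs)).map Prod.snd).Nodup :=
      ((hmid.map Prod.snd).nodup_iff).mp hnd
    simp only [List.map_cons, List.nodup_cons] at hnd'
    simp only [List.foldl_cons]
    apply ih
    · apply pvInsort_sorted x pq hs
      intro y hy hyx
      exact hnd'.1 (hyx ▸ (List.mem_map_of_mem (List.mem_append_left xs hy) : y.2 ∈ (pq ++ xs).map Prod.snd))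
    · have hperm2 : (pvInsort x pq ++ xs).Perm (x :: (pq ++ xs)) := by
        refine ((pvInsort_perm x pq).append_right xs).trans ?_
        simp
      refine ((hperm2.map Prod.snd).nodup_iff).mpr ?_
      simp only [List.map_cons, List.nodup_cons]
      exact hnd'

-- ---- A's selection scan, abstracted to the list of filtered lengths ----
def pvSel : List Nat → Nat → Nat → Int → Nat × Int
  | [], _, ml, mi => (ml, mi)
  | x :: xs, i, ml, mi => if ml < x then pvSel xs (i+1) x (i : Int) else pvSel xs (i+1) ml mi

theorem pvScan_eq_sel (last : List Int) :
    ∀ (lA : List (String × List Int)) (i ml : Nat) (mi : Int),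
      pvA_scan last lA i ml mi
        = (lA.map (fun p => (p.1, p.2.filter (fun u => !last.contains u))),
           pvSel (lA.map (fun p => (p.2.filter (fun u => !last.contains u)).length)) i ml mi) := by
  intro lA
  induction lA with
  | nil => intro i ml mi; simp [pvA_scan, pvSel]
  | cons p rest ih =>
    intro i ml mi
    simp only [pvA_scan, pvSel, List.map_cons]
    split_ifs with h <;> simp [ih]

theorem pvSel_no_improve :
    ∀ (L : List Nat) (i ml : Nat) (mi : Int), (∀ x ∈ L, x ≤ ml) → pvSel L i ml mi = (ml, mi) := by
  intro L
  induction L with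
  | nil => intro i ml mi _; rfl
  | cons x xs ih =>
    intro i ml mi h
    have : ¬ ml < x := by have := h x (by simp); omega
    simp only [pvSel, if_neg this]
    exact ih _ _ _ (fun y hy => h y (by simp [hy]))

theorem pvSel_first_max :
    ∀ (L : List Nat) (p : Nat) (hp : p < L.length) (i ml : Nat) (mi : Int),
      (∀ k (hk : k < p), L[k] < L[p]) →
      (∀ k (hk : k < L.length), L[k] ≤ L[p]) →
      ml < L[p] →
      pvSel L i ml mi = (L[p], (i : Int) + p) := by
  intro L
  induction L with
  | nil => intro p hp; simp at hp
  | cons x xs ih =>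
    intro p hp i ml mi hfirst hmax hml
    cases p with
    | zero =>
      simp only [List.getElem_cons_zero] at hml hmax
      simp only [pvSel, if_pos hml]
      rw [pvSel_no_improve xs (i+1) x i (fun y hy => by
        rcases List.mem_iff_getElem.mp hy with ⟨k, hk, rfl⟩
        have := hmax (k+1) (by simpa using Nat.succ_lt_succ hk)
        simpa using this)]
      simp
    | succ p' =>
      have hp' : p' < xs.length := by simpa using hp
      have hxp : x < xs[p'] := by
        have := hfirst 0 (Nat.succ_pos _)
        simpa using this
      have hfirst' : ∀ k (hk : k < p'), xs[k] < xs[p'] := by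
        intro k hk
        have := hfirst (k+1) (Nat.succ_lt_succ hk)
        simpa using this
      have hmax' : ∀ k (hk : k < xs.length), xs[k] ≤ xs[p'] := by
        intro k hk
        have := hmax (k+1) (by simpa using Nat.succ_lt_succ hk)
        simpa using this
      simp only [List.getElem_cons_succ] at hml ⊢
      by_cases hc : ml < x
      · simp only [pvSel, if_pos hc]
        rw [ih p' hp' (i+1) x i hfirst' hmax' hxp, Prod.mk.injEq]
        refine ⟨rfl, by push_cast; ring⟩
      · simp only [pvSel, if_neg hc]
        rw [ih p' hp' (i+1) ml mi hfirst' hmax' hml, Prod.mk.injEq]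
        refine ⟨rfl, by push_cast; ring⟩

-- ---- correctness of the lazy pop loop ----
theorem pvPopLoop_spec (D : PySem.Dict String (List Int)) (K : List String) (ass : PySem.Set Int) :
    ∀ (fuel : Nat) (pq : List (Int × Int)),
      pq.Pairwise (fun a b => pvEntryLt a b = true) →
      (pq.map Prod.snd).Nodup →
      (∀ e ∈ pq, ((pvLive D K ass e.2).length : Int) ≤ -e.1) →
      (pq.map (fun e => (-e.1).toNat)).sum + pq.length < fuel →
      (pq = [] ∧ pvPopLoop D K ass fuel pq = none) ∨
      (∃ e rest, pvPopLoop D K ass fuel pq = some (e, pvLive D K ass e.2, rest) ∧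
        ((pvLive D K ass e.2).length : Int) = -e.1 ∧
        (e.2 :: rest.map Prod.snd).Perm (pq.map Prod.snd) ∧
        rest.Pairwise (fun a b => pvEntryLt a b = true) ∧
        (∀ e' ∈ rest, ((pvLive D K ass e'.2).length : Int) ≤ -e'.1) ∧
        (∀ e' ∈ rest, (pvLive D K ass e'.2).length < (pvLive D K ass e.2).length ∨
           ((pvLive D K ass e'.2).length = (pvLive D K ass e.2).length ∧ e.2 < e'.2))) := by
  intro fuel
  induction fuel with
  | zero => intro pq _ _ _ hf; omega
  | succ fuel ih =>
    intro pq hs hnd hb hf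
    match pq with
    | [] => exact Or.inl ⟨rfl, rfl⟩
    | e :: rest =>
      right
      by_cases hfresh : ((pvLive D K ass e.2).length : Int) = -e.1
      · refine ⟨e, rest, by simp [pvPopLoop, hfresh], hfresh, by simp, (List.pairwise_cons.mp hs).2,
          (fun e' he' => hb e' (List.mem_cons_of_mem _ he')), ?_⟩
        intro e' he'
        have hlt := (List.pairwise_cons.mp hs).1 e' he'
        have hb' := hb e' (List.mem_cons_of_mem _ he')
        simp only [pvEntryLt, Bool.or_eq_true, Bool.and_eq_true, decide_eq_true_eq, beq_iff_eq] at hlt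
        omega
      · have hb0 := hb e List.mem_cons_self
        have hlt0 : ((pvLive D K ass e.2).length : Int) < -e.1 := lt_of_le_of_ne hb0 hfresh
        have hstep : pvPopLoop D K ass (fuel+1) (e :: rest)
            = pvPopLoop D K ass fuel (pvInsort (-(((pvLive D K ass e.2).length : Int)), e.2) rest) := by
          simp [pvPopLoop, hfresh]
        set enew : Int × Int := (-(((pvLive D K ass e.2).length : Int)), e.2) with henew
        have hpermI : (pvInsort enew rest).Perm (enew :: rest) := pvInsort_perm _ _
        have hndc : e.2 ∉ rest.map Prod.snd ∧ (rest.map Prod.snd).Nodup := by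
          simpa using hnd
        have hsnd : ((pvInsort enew rest).map Prod.snd).Perm (e.2 :: rest.map Prod.snd) := by
          simpa using hpermI.map Prod.snd
        have hs' : (pvInsort enew rest).Pairwise (fun a b => pvEntryLt a b = true) :=
          pvInsort_sorted enew rest (List.pairwise_cons.mp hs).2
            (fun x hx hh => hndc.1 (hh ▸ List.mem_map_of_mem hx))
        have hnd' : ((pvInsort enew rest).map Prod.snd).Nodup :=
          hsnd.nodup_iff.mpr (by simp [hndc.1, hndc.2])
        have hb'' : ∀ e' ∈ pvInsort enew rest, ((pvLive D K ass e'.2).length : Int) ≤ -e'.1 := by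
          intro e' he'
          rcases List.mem_cons.mp (hpermI.mem_iff.mp he') with rfl | he'
          · simp [henew]
          · exact hb e' (List.mem_cons_of_mem _ he')
        have hsum : ((pvInsort enew rest).map (fun e => (-e.1).toNat)).sum
            = (pvLive D K ass e.2).length + ((rest.map (fun e => (-e.1).toNat)).sum) := by
          have := (hpermI.map (fun e => (-e.1).toNat)).sum_eq
          simpa [henew] using this
        have hlen : (pvInsort enew rest).length = rest.length + 1 := hpermI.length_eq
        have hf' : ((pvInsort enew rest).map (fun e => (-e.1).toNat)).sum + (pvInsort enew rest).length < fuel := by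
          rw [hsum, hlen]
          simp only [List.map_cons, List.sum_cons, List.length_cons] at hf
          omega
        rcases ih (pvInsort enew rest) hs' hnd' hb'' hf' with ⟨heq, _⟩ | ⟨e', rest', hres, hfr, hperm', hs'', hb''', hmax⟩
        · exact absurd (congrArg List.length heq) (by rw [hlen]; simp)
        · refine ⟨e', rest', by rw [hstep]; exact hres, hfr, ?_, hs'', hb''', hmax⟩
          refine hperm'.trans ?_
          simpa using hsnd

-- ---- draining when nothing is left to assign (both loops return res unchanged) ----
theorem pvA_drain :
    ∀ (fuel : Nat) (lA : List (String × List Int)) (last : List Int) (res : PySem.Dict Int String) (num : Nat),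
      (∀ p ∈ lA, p.2.filter (fun u => !last.contains u) = []) →
      pvA_loop fuel lA last res num = res := by
  intro fuel
  induction fuel with
  | zero => intro lA last res num _; rfl
  | succ fuel ih =>
    intro lA last res num h
    by_cases hg : res.size < num
    case neg => simp [pvA_loop, hg]
    case pos =>
      simp only [pvA_loop, if_pos hg]
      rw [pvScan_eq_sel]
      rw [pvSel_no_improve _ 0 0 (-1) (by
        intro x hx
        rcases List.mem_map.mp hx with ⟨p, hp, rfl⟩
        rw [h p hp]
        simp)]
      rcases List.eq_nil_or_concat lA with rfl | ⟨l', q, rfl⟩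
      · simp [PySem.List.pop?, PySem.List.pyIdx?]
      · simp only [List.concat_eq_append, List.map_append, List.map_cons, List.map_nil]
        rw [PySem.List.pop?_last]
        simp only
        have hq : q.2.filter (fun u => !last.contains u) = [] := h q (by simp)
        rw [hq]
        simp only [List.foldl_nil]
        apply ih
        intro pfil hpf
        rcases List.mem_map.mp hpf with ⟨r, hr, rfl⟩
        simp only
        rw [h r (by simp [hr])]
        rfl

theorem pvB_drain (D : PySem.Dict String (List Int)) (K : List String) :
    ∀ (fuel : Nat) (pq : List (Int × Int)) (ass : PySem.Set Int) (res : PySem.Dict Int String) (num : Nat),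
      pq.Pairwise (fun a b => pvEntryLt a b = true) →
      (pq.map Prod.snd).Nodup →
      (∀ e ∈ pq, ((pvLive D K ass e.2).length : Int) ≤ -e.1) →
      (∀ i ∈ pq.map Prod.snd, pvLive D K ass i = []) →
      pvB_loop D K fuel pq ass res num = res := by
  intro fuel
  induction fuel with
  | zero => intro pq ass res num _ _ _ _; rfl
  | succ fuel ih =>
    intro pq ass res num hs hnd hb hz
    by_cases hg : res.size < num
    case neg => simp [pvB_loop, hg]
    case pos =>
      simp only [pvB_loop, if_pos hg]
      rcases pvPopLoop_spec D K ass (pvPopFuel pq) pq hs hnd hb (by unfold pvPopFuel; omega)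
        with ⟨rfl, hnone⟩ | ⟨e, rest, hres, _, hperm, hs', hb', _⟩
      · rw [hnone]
      · rw [hres]
        have hze : pvLive D K ass e.2 = [] := hz e.2 (hperm.mem_iff.mp (by simp))
        simp only [hze, List.foldl_nil]
        have hup : PySem.Set.update ass [] = ass := rfl
        rw [hup]
        apply ih rest ass res num hs'
          (((List.nodup_cons.mp (hperm.nodup_iff.mpr hnd))).2) hb'
        intro i hi
        exact hz i (hperm.mem_iff.mp (List.mem_cons_of_mem _ hi))

theorem pvForall₂_eraseIdx {α β : Type} {R : α → β → Prop} :
    ∀ {l : List α} {l' : List β}, List.Forall₂ R l l' → ∀ (n : Nat), List.Forall₂ R (l.eraseIdx n) (l'.eraseIdx n) := by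
  intro l l' h
  induction h with
  | nil => intro n; simp
  | @cons a b la lb hab h ih =>
    intro n
    cases n with
    | zero => simpa using h
    | succ n => simpa using List.Forall₂.cons hab (ih n)


theorem pvMap_eraseIdx {α β : Type} (f : α → β) :
    ∀ (l : List α) (n : Nat), (l.eraseIdx n).map f = (l.map f).eraseIdx n := by
  intro l
  induction l with
  | nil => intro n; simp
  | cons x xs ih =>
    intro n
    cases n with
    | zero => simp
    | succ n => simp [List.eraseIdx_cons_succ, ih]

theorem pvPerm_cons_eraseIdx {α : Type} (l : List α) (i : Nat) (h : i < l.length) :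
    (l[i] :: l.eraseIdx i).Perm l := by
  induction l generalizing i with
  | nil => simp at h
  | cons x xs ih =>
    cases i with
    | zero => simp
    | succ n =>
      simp only [List.getElem_cons_succ, List.eraseIdx_cons_succ]
      exact (List.Perm.swap x (xs[n]'(by simpa using h)) _).trans ((ih n (by simpa using h)).cons x)

-- one round's reassignment: A's filter against last_update matches B's assigned set
theorem pvRel_step (D : PySem.Dict String (List Int)) (last liveE : List Int) (ass : PySem.Set Int)
    (p : String × List Int) (f : String) (h : pvRel D last ass p f) :
    pvRel D liveE (PySem.Set.update ass liveE)
      (p.1, p.2.filter (fun u => !last.contains u)) f := by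
  refine ⟨h.1, ?_⟩
  simp only
  rw [h.2, List.filter_filter]
  apply List.filter_congr
  intro x _
  rw [pvContains_update]
  simp [Bool.and_comm]

-- ---- the main loop correspondence ----
theorem pvLoop_eq (D : PySem.Dict String (List Int)) (K : List String) :
    ∀ (fuel : Nat) (lA : List (String × List Int)) (last : List Int)
      (pq : List (Int × Int)) (ass : PySem.Set Int) (res : PySem.Dict Int String) (num : Nat)
      (idxs : List Int),
      idxs.Pairwise (· < ·) →
      List.Forall₂ (pvRel D last ass) lA (idxs.map (fun i => PySem.List.pyGetD K i "")) →
      (pq.map Prod.snd).Perm idxs →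
      pq.Pairwise (fun a b => pvEntryLt a b = true) →
      (∀ e ∈ pq, ((pvLive D K ass e.2).length : Int) ≤ -e.1) →
      lA.length < fuel →
      pvA_loop fuel lA last res num = pvB_loop D K fuel pq ass res num := by
  intro fuel
  induction fuel with
  | zero => intro lA last pq ass res num idxs _ _ _ _ _ hfl; omega
  | succ fuel ih =>
    intro lA last pq ass res num idxs hsort hF hperm hpqs hb hfl
    by_cases hg : res.size < num
    case neg => simp [pvA_loop, pvB_loop, hg]
    case pos =>
    have hndidx : idxs.Nodup := hsort.imp ne_of_lt
    have hnd : (pq.map Prod.snd).Nodup := hperm.nodup_iff.mpr hndidx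
    rcases pvPopLoop_spec D K ass (pvPopFuel pq) pq hpqs hnd hb (by unfold pvPopFuel; omega)
      with ⟨hpqnil, hnone⟩ | ⟨e, rest, hres, hfr, hpm, hs', hb', hmax⟩
    · subst hpqnil
      have hidxs : idxs = [] := by
        have h0 : List.Perm ([] : List Int) idxs := by simpa using hperm
        exact h0.symm.eq_nil
      subst hidxs
      have hlA : lA = [] := by
        simp only [List.map_nil] at hF
        exact List.forall₂_nil_right_iff.mp hF
      subst hlA
      simp only [pvA_loop, pvB_loop, if_pos hg]
      rw [hnone]
      simp [pvA_scan, PySem.List.pop?, PySem.List.pyIdx?]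
    · have hchain : (e.2 :: rest.map Prod.snd).Perm idxs := hpm.trans hperm
      by_cases hall : ∀ i ∈ idxs, pvLive D K ass i = []
      · -- everything left is dead weight: both loops drain and return res unchanged
        obtain ⟨hlen0, hget⟩ := List.forall₂_iff_get.mp hF
        have hlen : lA.length = idxs.length := by simpa using hlen0
        rw [pvA_drain (fuel+1) lA last res num ?hA, pvB_drain D K (fuel+1) pq ass res num hpqs hnd hb ?hB]
        case hB =>
          intro i hi
          exact hall i (hperm.mem_iff.mp hi)
        case hA =>
          intro p hp
          rcases List.mem_iff_getElem.mp hp with ⟨k, hk, rfl⟩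
          have h1 := hget k hk (by simpa using (hlen ▸ hk))
          simp only [List.get_eq_getElem, List.getElem_map] at h1
          rw [h1.2]
          exact hall _ (List.getElem_mem _)
      · push Not at hall
        obtain ⟨i0, hi0m, hi0⟩ := hall
        have hEmem : e.2 ∈ idxs := hchain.mem_iff.mp List.mem_cons_self
        have hidx : ∀ i, i ∈ idxs → i ≠ e.2 →
            ((pvLive D K ass i).length < (pvLive D K ass e.2).length ∨
             ((pvLive D K ass i).length = (pvLive D K ass e.2).length ∧ e.2 < i)) := by
          intro i hi hne
          have hir : i ∈ rest.map Prod.snd := by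
            rcases List.mem_cons.mp (hchain.symm.mem_iff.mp hi) with h' | h'
            · exact absurd h' hne
            · exact h'
          rcases List.mem_map.mp hir with ⟨e', he', hei⟩
          rw [← hei]
          exact hmax e' he'
        have hpos : 0 < (pvLive D K ass e.2).length := by
          by_cases hio : i0 = e.2
          · subst hio; exact List.length_pos_iff.mpr hi0
          · have h0 : 0 < (pvLive D K ass i0).length := List.length_pos_iff.mpr hi0
            rcases hidx i0 hi0m hio with hlt | ⟨heq, _⟩ <;> omega
        obtain ⟨p, hp, hpe⟩ := List.mem_iff_getElem.mp hEmem
        obtain ⟨hlen0, hget⟩ := List.forall₂_iff_get.mp hF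
        have hlen : lA.length = idxs.length := by simpa using hlen0
        have hLLk : ∀ (k : Nat) (hk : k < idxs.length),
            (lA.map (fun q => (q.2.filter (fun u => !last.contains u)).length))[k]'(by
              simpa [hlen] using hk) = (pvLive D K ass (idxs[k])).length := by
          intro k hk
          have h1 := hget k (by omega) (by simpa using hk)
          simp only [List.get_eq_getElem, List.getElem_map] at h1
          simp only [List.getElem_map]
          rw [h1.2]
          rfl
        have hLLp := hLLk p hp
        have hsel : pvSel (lA.map (fun q => (q.2.filter (fun u => !last.contains u)).length)) 0 0 (-1)
            = ((pvLive D K ass e.2).length, (p : Int)) := by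
          have hpL : p < (lA.map (fun q => (q.2.filter (fun u => !last.contains u)).length)).length := by
            simpa [hlen] using hp
          have hfirstk : ∀ k (hk : k < p),
              (lA.map (fun q => (q.2.filter (fun u => !last.contains u)).length))[k]'(by omega)
                < (lA.map (fun q => (q.2.filter (fun u => !last.contains u)).length))[p]'hpL := by
            intro k hk
            have hkl : k < idxs.length := by omega
            have hklt : idxs[k] < idxs[p] := List.pairwise_iff_getElem.mp hsort k p hkl hp hk
            rw [hLLk k hkl, hLLp, hpe]
            have hne : idxs[k] ≠ e.2 := by rw [hpe] at hklt; omega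
            rcases hidx idxs[k] (List.getElem_mem _) hne with hlt | ⟨heq, hgt⟩
            · exact hlt
            · exfalso; rw [hpe] at hklt; omega
          have hmaxk : ∀ k (hk : k < (lA.map (fun q => (q.2.filter (fun u => !last.contains u)).length)).length),
              (lA.map (fun q => (q.2.filter (fun u => !last.contains u)).length))[k]'hk
                ≤ (lA.map (fun q => (q.2.filter (fun u => !last.contains u)).length))[p]'hpL := by
            intro k hk
            have hkl : k < idxs.length := by simp at hk; omega
            by_cases hkp : k = p
            · subst hkp; exact le_refl _
            · rw [hLLk k hkl, hLLp, hpe]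
              have hne : idxs[k] ≠ e.2 := by
                rw [← hpe]
                intro hcon
                exact hkp ((List.Nodup.getElem_inj_iff hndidx).mp hcon)
              rcases hidx idxs[k] (List.getElem_mem _) hne with hlt | ⟨heq, _⟩ <;> omega
          have hml : 0 < (lA.map (fun q => (q.2.filter (fun u => !last.contains u)).length))[p]'hpL := by
            rw [hLLp, hpe]; exact hpos
          rw [pvSel_first_max _ p hpL 0 0 (-1) hfirstk hmaxk hml, hLLp, hpe]
          simp
        simp only [pvA_loop, pvB_loop, if_pos hg]
        rw [hres, pvScan_eq_sel, hsel]
        simp only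
        have hplt : p < (lA.map (fun q => (q.1, q.2.filter (fun u => !last.contains u)))).length := by
          simpa [hlen] using hp
        rw [PySem.List.pop?_natCast _ p hplt]
        simp only
        have h1 := hget p (by omega) (by simpa using hp)
        simp only [List.get_eq_getElem, List.getElem_map] at h1
        have hentry : (lA.map (fun q => (q.1, q.2.filter (fun u => !last.contains u))))[p]'hplt
            = (PySem.List.pyGetD K e.2 "", pvLive D K ass e.2) := by
          rw [List.getElem_map]
          refine Prod.ext ?_ ?_
          · simp only; rw [h1.1, hpe]
          · simp only; rw [h1.2, hpe]; rfl
        rw [hentry]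
        simp only
        -- recurse with the invariant re-established
        apply ih _ _ rest _ _ num (idxs.eraseIdx p)
          (hsort.sublist (List.eraseIdx_sublist idxs p))
        · -- Forall₂ after the round
          rw [pvMap_eraseIdx]
          apply pvForall₂_eraseIdx
          rw [List.forall₂_map_left_iff]
          exact hF.imp (fun a b hab => pvRel_step D last (pvLive D K ass e.2) ass a b hab)
        · -- the queue's indices are the remaining ones
          have hmid : (idxs[p] :: idxs.eraseIdx p).Perm idxs := pvPerm_cons_eraseIdx idxs p hp
          have hchain2 : (e.2 :: rest.map Prod.snd).Perm (e.2 :: idxs.eraseIdx p) := by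
            refine hchain.trans ?_
            rw [← hpe]
            exact hmid.symm
          exact hchain2.cons_inv
        · exact hs'
        · -- stored counts still dominate the shrunken live counts
          intro e' he'
          refine le_trans ?_ (hb' e' he')
          have : (pvLive D K (PySem.Set.update ass (pvLive D K ass e.2)) e'.2).length
              ≤ (pvLive D K ass e'.2).length := by
            rw [pvLive_update]
            exact List.length_filter_le _ _
          exact_mod_cast this
        · -- fuel
          have hplA : p < lA.length := by omega
          have : ((lA.map (fun q => (q.1, q.2.filter (fun u => !last.contains u)))).eraseIdx p).length
              = lA.length - 1 := by
            rw [List.length_eraseIdx]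
            simp [hplA]
          omega

theorem pvFoldl_insort_map {α : Type} (g : α → Int × Int) :
    ∀ (l : List α) (init : List (Int × Int)),
      l.foldl (fun pq p => pvInsort (g p) pq) init = (l.map g).foldl (fun pq e => pvInsort e pq) init := by
  intro l
  induction l with
  | nil => intro init; rfl
  | cons x xs ih => intro init; simp [ih]

-- ---- the initial states satisfy the invariant ----
theorem pvInit_forall₂ (l : List (Int × List (String × Int)))
    (hkeysnd : (pvB_buildIndex l).keys.Nodup) :
    List.Forall₂ (pvRel (pvB_buildIndex l) [] PySem.Set.empty)
      (pvB_buildIndex l).items (pvB_buildIndex l).keys := by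
  have hkeys : (pvB_buildIndex l).keys = (pvB_buildIndex l).items.map Prod.fst := rfl
  rw [hkeys, List.forall₂_map_right_iff]
  rw [List.forall₂_same]
  intro p hp
  refine ⟨rfl, ?_⟩
  have hget : (pvB_buildIndex l).getD p.1 [] = p.2 :=
    PySem.Dict.getD_of_mem_items _ (by simpa using hp) hkeysnd []
  rw [hget]
  simp [PySem.Set.empty, PySem.Set.contains]

-- ===== VERDICT (by name: the statement is the Claim_ definition above) =====
set_option maxHeartbeats 1600000 in
theorem generate_minimum_used_fonts_dict_spec : Claim_equal_generate_minimum_used_fonts_dict := by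
  unfold Claim_equal_generate_minimum_used_fonts_dict
  intro l _hDom hPre
  unfold Spec_generate_minimum_used_fonts_dict
  unfold generate_minimum_used_fonts_dict generate_minimum_used_fonts_dict_alt
  simp only [pvBuild_eq]
  have hKnd : (pvB_buildIndex l).keys.Nodup := pvBuild_keys_nodup l
  have hKlen : (pvB_buildIndex l).keys.length = (pvB_buildIndex l).items.length := by
    simp [PySem.Dict.keys]
  rw [hKlen]
  apply congrArg PySem.Dict.items
  have hsnd0 : ((PySem.List.enumerate (pvB_buildIndex l).keys).map
        (fun p => ((-(((pvB_buildIndex l).getD p.2 []).length : Int)), p.1))).map Prod.snd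
      = List.map (fun k : Nat => (k : Int)) (List.range (pvB_buildIndex l).keys.length) := by
    rw [List.map_map]
    have hc : (Prod.snd ∘ fun p : Int × String =>
        ((-(((pvB_buildIndex l).getD p.2 []).length : Int)), p.1)) = Prod.fst := rfl
    rw [hc, PySem.List.map_fst_enumerate, zero_add, PySem.List.pyRange_zero_natCast]
  apply pvLoop_eq (pvB_buildIndex l) (pvB_buildIndex l).keys ((pvB_buildIndex l).items.length + 1)
    (pvB_buildIndex l).items [] _ PySem.Set.empty PySem.Dict.empty l.length
    (List.map (fun k : Nat => (k : Int)) (List.range (pvB_buildIndex l).keys.length))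
  · apply List.pairwise_map.mpr
    exact List.pairwise_lt_range.imp (fun h => by exact_mod_cast h)
  · have hmapK : (List.map (fun k : Nat => (k : Int)) (List.range (pvB_buildIndex l).keys.length)).map
        (fun i => PySem.List.pyGetD (pvB_buildIndex l).keys i "") = (pvB_buildIndex l).keys := by
      rw [List.map_map]
      apply List.ext_getElem (by simp)
      intro k h1 h2
      simp only [Function.comp, List.getElem_map, List.getElem_range]
      rw [PySem.List.pyGetD_natCast]
      simp [List.getD_eq_getElem?_getD, List.getElem?_eq_getElem h2]
    rw [hmapK]
    exact pvInit_forall₂ l hKnd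
  · rw [pvFoldl_insort_map]
    have h1 : ((List.foldl (fun pq e => pvInsort e pq) []
        ((PySem.List.enumerate (pvB_buildIndex l).keys).map
          (fun p => ((-(((pvB_buildIndex l).getD p.2 []).length : Int)), p.1)))).map Prod.snd).Perm
        (((PySem.List.enumerate (pvB_buildIndex l).keys).map
          (fun p => ((-(((pvB_buildIndex l).getD p.2 []).length : Int)), p.1))).map Prod.snd) := by
      have := (pvFoldl_insort_perm ((PySem.List.enumerate (pvB_buildIndex l).keys).map
        (fun p => ((-(((pvB_buildIndex l).getD p.2 []).length : Int)), p.1))) []).map Prod.snd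
      simpa using this
    rw [hsnd0] at h1
    exact h1
  · rw [pvFoldl_insort_map]
    apply pvFoldl_insort_sorted _ [] List.Pairwise.nil
    rw [List.nil_append, hsnd0]
    exact (List.nodup_range).map (fun a b h => by exact_mod_cast h)
  · intro e he
    rw [pvFoldl_insort_map] at he
    have hmem : e ∈ (PySem.List.enumerate (pvB_buildIndex l).keys).map
        (fun p => ((-(((pvB_buildIndex l).getD p.2 []).length : Int)), p.1)) := by
      have := (pvFoldl_insort_perm ((PySem.List.enumerate (pvB_buildIndex l).keys).map
        (fun p => ((-(((pvB_buildIndex l).getD p.2 []).length : Int)), p.1))) []).mem_iff.mp he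
      simpa using this
    rcases List.mem_map.mp hmem with ⟨q, hq, rfl⟩
    rcases (PySem.List.mem_enumerate_iff _ _ _).mp hq with ⟨k, hk, rfl⟩
    simp only [zero_add, neg_neg]
    unfold pvLive
    have hKk : PySem.List.pyGetD (pvB_buildIndex l).keys ((k : Int)) "" = (pvB_buildIndex l).keys[k] := by
      rw [PySem.List.pyGetD_natCast]
      simp [List.getD_eq_getElem?_getD, List.getElem?_eq_getElem hk]
    rw [hKk]
    have hfil : ((pvB_buildIndex l).getD ((pvB_buildIndex l).keys[k]) []).filter
        (fun u => !(PySem.Set.contains PySem.Set.empty u)) =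
        (pvB_buildIndex l).getD ((pvB_buildIndex l).keys[k]) [] := by
      apply List.filter_eq_self.mpr
      intro a _
      simp [PySem.Set.empty, PySem.Set.contains]
    rw [hfil]
  · omega
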